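-- pv_equiv track=rewrite | github.com/shree-shubham/CookAlong | sandbox/get_directions.py | get_oven
-- ===== SOURCE A (Python) =====
-- import string
--
-- def get_oven(direction):
-- 	exclude = string.punctuation
-- 	direction = ''.join([ch for ch in direction if ch not in exclude])
-- 	direction = direction.lower().split()
-- 	oven_keyword = ['oven', 'ovens', 'broil', 'broiler', 'preheat']
-- 	for keyword in oven_keyword:
-- 		if (keyword in direction):
-- 			return True
-- 	return False
-- ===== SOURCE B (Python) =====
-- import string
--
-- def get_oven(direction):
-- 	punct = frozenset(string.punctuation)
-- 	keywords = frozenset(['oven', 'ovens', 'broil', 'broiler', 'preheat'])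
-- 	word = ''
-- 	for ch in direction:
-- 		if ch in punct:
-- 			continue
-- 		if ch.isspace():
-- 			if word in keywords:
-- 				return True
-- 			word = ''
-- 		else:
-- 			word += ch.lower()
-- 	return word in keywords
-- ===== Notes on version B (the rewrite author's own statement) =====
-- stated objective: alternative
-- what changed: A builds a cleaned string, lowercases it, splits it into a word list and then scans that list once per keyword; B is a single streaming pass over the characters that skips punctuation, lowercases each char inline, accumulates the current word and tests it against the keyword set at each whitespace boundary, returning early on a hit - no intermediate cleaned string or word list is ever built.
import Mathlib
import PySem

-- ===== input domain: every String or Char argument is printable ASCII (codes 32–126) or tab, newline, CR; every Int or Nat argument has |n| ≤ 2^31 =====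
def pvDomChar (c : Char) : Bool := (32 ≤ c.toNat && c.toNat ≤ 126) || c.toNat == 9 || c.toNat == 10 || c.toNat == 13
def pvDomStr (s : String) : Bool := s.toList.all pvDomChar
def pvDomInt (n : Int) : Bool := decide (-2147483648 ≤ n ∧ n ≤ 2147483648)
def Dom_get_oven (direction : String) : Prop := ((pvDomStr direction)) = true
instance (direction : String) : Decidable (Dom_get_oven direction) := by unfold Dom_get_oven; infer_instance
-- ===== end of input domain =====

-- B replaces A's staged passes (strip punctuation into a new string, lower, split into a
-- word list, then scan that list once per keyword) by one streaming pass over the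
-- characters that accumulates the current word and tests it at each whitespace boundary;
-- objective: alternative.

-- ===== PORT A =====
-- string.punctuation
def pvPunct : List Char := "!\"#$%&'()*+,-./:;<=>?@[\\]^_`{|}~".toList

def pvOvenKeywords : List (List Char) :=
  ["oven".toList, "ovens".toList, "broil".toList, "broiler".toList, "preheat".toList]

-- 'for keyword in oven_keyword: if keyword in direction: return True' / 'return False'
def pvOvenLoop (ks : List (List Char)) (words : List (List Char)) : Bool :=
  match ks with
  | [] => false
  | k :: rest => if words.contains k then true else pvOvenLoop rest words

def get_oven (direction : String) : Bool :=
  let filtered := direction.toList.filter (fun ch => !(pvPunct.contains ch))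
  let words := PySem.Chars.split₀ (PySem.Chars.lower filtered)
  pvOvenLoop pvOvenKeywords words

-- ===== PORT B =====
-- the streaming loop of Source B: 'word' is the pending cleaned word, punctuation is
-- skipped, whitespace flushes the word against the keyword set (early True), and
-- the trailing word is tested on exit
def pvStream (cs : List Char) (word : List Char) : Bool :=
  match cs with
  | [] => pvOvenKeywords.contains word
  | c :: rest =>
    if pvPunct.contains c then pvStream rest word
    else if PySem.Chars.isspace c then
      if pvOvenKeywords.contains word then true else pvStream rest []
    else pvStream rest (word ++ [PySem.Chars.lowerChar c])

def get_oven_alt (direction : String) : Bool :=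
  pvStream direction.toList []

-- ===== PRECONDITION & SPEC =====
def Spec_get_oven (direction : String) (out : Bool) : Prop := out = get_oven_alt direction
instance (direction : String) (out : Bool) : Decidable (Spec_get_oven direction out) := by unfold Spec_get_oven; infer_instance

-- ===== CLAIM (what is proved, stated in full; the proofs are below) =====
def Claim_equal_get_oven : Prop := ∀ (direction : String), Dom_get_oven direction → Spec_get_oven direction (get_oven direction)

-- ===== LEMMAS AND PROOFS =====

-- A's keyword loop is an 'any' over the keywords
theorem pvOvenLoop_eq_any (ks words : List (List Char)) :
    pvOvenLoop ks words = ks.any (fun k => words.contains k) := by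
  induction ks with
  | nil => rfl
  | cons k rest ih => cases h : words.contains k <;> simp only [pvOvenLoop, h, ih, List.any_cons,
        Bool.false_eq_true, if_true, if_false, Bool.true_or, Bool.false_or]

-- lowering a char does not change whether it is whitespace
theorem pvIsspace_lowerChar (c : Char) :
    PySem.Chars.isspace (PySem.Chars.lowerChar c) = PySem.Chars.isspace c := by
  unfold PySem.Chars.lowerChar
  split_ifs with h
  · have hub : 65 ≤ c.toNat ∧ c.toNat ≤ 90 := by
      simp only [PySem.Chars.isupper, Bool.and_eq_true, decide_eq_true_eq, Char.le_def] at h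
      exact ⟨h.1, h.2⟩
    have hv : (c.toNat + 32).isValidChar := Or.inl (by omega)
    have hm : (Char.ofNat (c.toNat + 32)).toNat = c.toNat + 32 := by
      rw [Char.toNat_ofNat, if_pos hv]
    rw [Bool.eq_iff_iff]
    simp only [PySem.Chars.isspace, hm, Bool.or_eq_true, Bool.and_eq_true, decide_eq_true_eq]
    omega
  · rfl

-- split₀.go with accumulator acc prepends acc.reverse to the acc-free run
theorem pvGo_append (cs : List Char) : ∀ (cur : List Char) (acc : List (List Char)),
    PySem.Chars.split₀.go cs cur acc = acc.reverse ++ PySem.Chars.split₀.go cs cur [] := by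
  induction cs with
  | nil =>
    intro cur acc
    simp only [PySem.Chars.split₀.go]
    by_cases h : cur.isEmpty = true
    · rw [if_pos h, if_pos h]; simp
    · rw [if_neg h, if_neg h]; simp
  | cons c rest ih =>
    intro cur acc
    simp only [PySem.Chars.split₀.go]
    by_cases hs : PySem.Chars.isspace c = true
    · rw [if_pos hs, if_pos hs]
      by_cases hv : cur.isEmpty = true
      · rw [if_pos hv, if_pos hv]
        exact ih _ _
      · rw [if_neg hv, if_neg hv]
        rw [ih [] (cur.reverse :: acc), ih [] [cur.reverse]]
        simp
    · rw [if_neg hs, if_neg hs]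
      exact ih _ _

-- the streaming pass computes 'some produced word (including the pending one) is a keyword'
theorem pvStream_eq_go (cs : List Char) : ∀ (word : List Char),
    pvStream cs word =
      (PySem.Chars.split₀.go
        (PySem.Chars.lower (cs.filter (fun ch => !(pvPunct.contains ch)))) word.reverse []).any
        (fun w => pvOvenKeywords.contains w) := by
  induction cs with
  | nil =>
    intro word
    simp only [pvStream, List.filter_nil, PySem.Chars.lower, List.map_nil,
      PySem.Chars.split₀.go]
    by_cases hv : word.reverse.isEmpty = true
    · have hw : word = [] := by
        rcases word with _ | ⟨a, t⟩
        · rfl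
        · simp at hv
      subst hw
      rw [if_pos hv]
      decide
    · rw [if_neg hv]
      simp
  | cons c rest ih =>
    intro word
    by_cases hp : pvPunct.contains c = true
    · -- punctuation: dropped by the filter, skipped by the stream
      have hstep : pvStream (c :: rest) word = pvStream rest word := by
        simp only [pvStream]
        rw [if_pos hp]
      rw [hstep, List.filter_cons, if_neg (by rw [hp]; decide)]
      exact ih word
    · -- kept character
      have hpf : pvPunct.contains c = false := by simpa using hp
      rw [List.filter_cons, if_pos (by rw [hpf]; decide)]
      simp only [PySem.Chars.lower, List.map_cons]
      by_cases hs : PySem.Chars.isspace c = true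
      · -- whitespace: flush
        have hstep : pvStream (c :: rest) word =
            (if pvOvenKeywords.contains word = true then true else pvStream rest []) := by
          simp only [pvStream]
          rw [if_neg hp, if_pos hs]
        rw [hstep]
        have hls : PySem.Chars.isspace (PySem.Chars.lowerChar c) = true := by
          rw [pvIsspace_lowerChar]; exact hs
        simp only [PySem.Chars.split₀.go]
        rw [if_pos hls]
        by_cases hv : word.reverse.isEmpty = true
        · have hw : word = [] := by
            rcases word with _ | ⟨a, t⟩
            · rfl
            · simp at hv
          subst hw
          rw [if_pos hv, if_neg (by decide), ih []]
          simp [PySem.Chars.lower]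
        · rw [if_neg hv]
          rw [pvGo_append _ [] [word.reverse.reverse], ih []]
          cases hk : pvOvenKeywords.contains word
          · have hnk : word ∉ pvOvenKeywords := by simpa using hk
            simp [PySem.Chars.lower, hnk]
          · have hmk : word ∈ pvOvenKeywords := by simpa using hk
            simp [hmk]
      · -- ordinary character: extend the word
        have hstep : pvStream (c :: rest) word =
            pvStream rest (word ++ [PySem.Chars.lowerChar c]) := by
          simp only [pvStream]
          rw [if_neg hp, if_neg hs]
        have hls : ¬ PySem.Chars.isspace (PySem.Chars.lowerChar c) = true := by
          rw [pvIsspace_lowerChar]; exact hs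
        rw [hstep, ih (word ++ [PySem.Chars.lowerChar c])]
        simp only [PySem.Chars.split₀.go]
        rw [if_neg hls]
        simp [PySem.Chars.lower]

-- ===== VERDICT (by name: the statement is the Claim_ definition above) =====
theorem get_oven_spec : Claim_equal_get_oven := by
  intro direction _
  unfold Spec_get_oven get_oven get_oven_alt
  rw [pvOvenLoop_eq_any, pvStream_eq_go]
  simp only [List.reverse_nil]
  rw [Bool.eq_iff_iff]
  simp only [List.any_eq_true, List.contains_iff_mem, PySem.Chars.split₀]
  exact ⟨fun ⟨k, hk, hw⟩ => ⟨k, hw, hk⟩, fun ⟨w, hw, hk⟩ => ⟨w, hk, hw⟩⟩
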